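-- pv_equiv track=rewrite | github.com/AvivWn/NLP-NOMLEX-Nominalization | CreateData.py | tags_to_text
-- ===== SOURCE A (Python) =====
-- def tags_to_text(tags):
-- 	"""
-- 	Translates a list of tags into a sentence
-- 	:param tags: a list of tags (list)
-- 	:return: a sentence
-- 	"""
--
-- 	tags += ["NONE"] # To make sure that also the last tag is also used
-- 	text_tuples = []
-- 	last_tag = ("NONE", -1)
--
-- 	for i in range(len(tags)):
-- 		if tags[i] == "NONE":
-- 			if tags[i] != last_tag[0]:
-- 				text_tuples.append(str(last_tag[0]) + "_" + str(last_tag[1]) + "_" + str(i - 1))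
-- 				last_tag = ("NONE", i)
-- 		else:
-- 			if last_tag[0] == "NONE":
-- 				last_tag = (tags[i], i)
-- 			elif last_tag[0] != tags[i]:
-- 				text_tuples.append(str(last_tag[0]) + "_" + str(last_tag[1]) + "_" + str(i - 1))
-- 				last_tag = (tags[i], i)
--
-- 	return " ".join(text_tuples)
-- ===== SOURCE B (Python) =====
-- def tags_to_text(tags):
-- 	tags += ["NONE"]  # same in-place mutation as the original
-- 	# pass 1: materialize maximal runs as [tag, length]
-- 	runs = []
-- 	for t in tags:
-- 		if runs and runs[-1][0] == t:
-- 			runs[-1][1] += 1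
-- 		else:
-- 			runs.append([t, 1])
-- 	# pass 2: emit one "tag_start_end" per non-NONE run
-- 	parts = []
-- 	pos = 0
-- 	for key, n in runs:
-- 		if key != "NONE":
-- 			parts.append(str(key) + "_" + str(pos) + "_" + str(pos + n - 1))
-- 		pos += n
-- 	return " ".join(parts)
-- ===== Notes on version B (the rewrite author's own statement) =====
-- stated objective: alternative
-- what changed: Replaced A's single-pass last_tag transition state machine with a two-pass run-length formulation: first materialize maximal runs as (tag, length) pairs, then emit 'tag_start_end' for each non-NONE run from a running position counter.
import Mathlib
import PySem

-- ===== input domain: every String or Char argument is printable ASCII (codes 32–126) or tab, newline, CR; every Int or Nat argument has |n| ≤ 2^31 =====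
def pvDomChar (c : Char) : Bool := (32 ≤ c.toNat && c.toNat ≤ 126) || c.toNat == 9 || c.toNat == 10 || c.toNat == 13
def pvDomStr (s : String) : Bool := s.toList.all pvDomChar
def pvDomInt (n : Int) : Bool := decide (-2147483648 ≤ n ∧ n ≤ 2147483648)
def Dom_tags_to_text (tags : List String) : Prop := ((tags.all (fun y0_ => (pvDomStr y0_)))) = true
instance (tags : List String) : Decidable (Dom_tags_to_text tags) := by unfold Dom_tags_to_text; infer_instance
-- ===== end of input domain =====

-- B replaces A's last_tag transition state machine by two passes (materialize runs, then emit); same return value.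
-- Both Pythons mutate the argument in place (tags += ["NONE"]); the equivalence proved here is about the return value.

-- ===== PORT A =====
-- step for "for i in range(len(tags)): …" with state (text_tuples, last_tag)
def pvAStep (st : List String × String × Int) (p : Int × String) : List String × String × Int :=
  let (acc, lt, li) := st
  let (i, x) := p
  if x == "NONE" then
    if x != lt then
      (acc ++ [lt ++ "_" ++ PySem.Int.toStr li ++ "_" ++ PySem.Int.toStr (i - 1)], ("NONE", i))
    else (acc, lt, li)
  else
    if lt == "NONE" then (acc, (x, i))
    else if lt != x then
      (acc ++ [lt ++ "_" ++ PySem.Int.toStr li ++ "_" ++ PySem.Int.toStr (i - 1)], (x, i))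
    else (acc, lt, li)

def tags_to_text (tags : List String) : String :=
  let tags2 := tags ++ ["NONE"]
  let fin := (PySem.List.enumerate tags2 0).foldl pvAStep ([], ("NONE", -1))
  PySem.Str.join " " fin.1

-- ===== PORT B =====
-- pass 1 of Source B: build the run list; the Python appends to / increments the LAST run,
-- so the accumulator here is the run list in REVERSE (head = last run), reversed at the end
def pvBRunStep (racc : List (String × Int)) (t : String) : List (String × Int) :=
  match racc with
  | (k, n) :: rest => if k == t then (k, n + 1) :: rest else (t, 1) :: (k, n) :: rest
  | [] => [(t, 1)]

-- pass 2 of Source B: emit one part per non-NONE run, tracking the position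
def pvBEmitStep (st : List String × Int) (r : String × Int) : List String × Int :=
  let (parts, pos) := st
  let (key, n) := r
  ((if key != "NONE" then
      parts ++ [key ++ "_" ++ PySem.Int.toStr pos ++ "_" ++ PySem.Int.toStr (pos + n - 1)]
    else parts), pos + n)

def tags_to_text_alt (tags : List String) : String :=
  let tags2 := tags ++ ["NONE"]
  let runs := (tags2.foldl pvBRunStep []).reverse
  let fin := runs.foldl pvBEmitStep ([], 0)
  PySem.Str.join " " fin.1

-- ===== PRECONDITION & SPEC =====
def Spec_tags_to_text (tags : List String) (out : String) : Prop := out = tags_to_text_alt tags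
instance (tags : List String) (out : String) : Decidable (Spec_tags_to_text tags out) := by unfold Spec_tags_to_text; infer_instance

-- ===== CLAIM (what is proved, stated in full; the proofs are below) =====
def Claim_equal_tags_to_text : Prop := ∀ (tags : List String), Dom_tags_to_text tags → Spec_tags_to_text tags (tags_to_text tags)

-- ===== LEMMAS AND PROOFS =====

-- emitted part for a run of tag k starting at s and ending at e
def pvEmit (k : String) (s e : Int) : String :=
  k ++ "_" ++ PySem.Int.toStr s ++ "_" ++ PySem.Int.toStr e

-- reference form of A's loop: pending tag k since index li, current index i
def pvGo (k : String) (li i : Int) : List String → List String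
  | [] => []
  | x :: rest =>
    if x = "NONE" then
      if k = "NONE" then pvGo k li (i + 1) rest
      else pvEmit k li (i - 1) :: pvGo "NONE" i (i + 1) rest
    else
      if k = "NONE" then pvGo x i (i + 1) rest
      else if k = x then pvGo k li (i + 1) rest
      else pvEmit k li (i - 1) :: pvGo x i (i + 1) rest

-- runs of (k repeated n times) ++ ts
def pvExt (k : String) (n : Int) : List String → List (String × Int)
  | [] => [(k, n)]
  | x :: rest => if k = x then pvExt k (n + 1) rest else (k, n) :: pvExt x 1 rest

-- reference form of B's second pass
def pvParts (pos : Int) : List (String × Int) → List String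
  | [] => []
  | (k, n) :: rs =>
    (if k = "NONE" then [] else [pvEmit k pos (pos + n - 1)]) ++ pvParts (pos + n) rs

theorem pvAStep_fold (ts : List String) : ∀ (i : Int) (acc : List String) (k : String) (li : Int),
    ((PySem.List.enumerate ts i).foldl pvAStep (acc, k, li)).1 = acc ++ pvGo k li i ts := by
  induction ts with
  | nil => intro i acc k li; simp [PySem.List.enumerate_nil, pvGo]
  | cons x rest ih =>
    intro i acc k li
    rw [PySem.List.enumerate_cons]
    by_cases hx : x = "NONE"
    · by_cases hk : k = "NONE"
      · simp [List.foldl_cons, pvAStep, hx, hk, ih, pvGo]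
      · simp [List.foldl_cons, pvAStep, hx, hk,
          (show ¬ ("NONE" : String) = k from fun h => hk h.symm), ih, pvGo, pvEmit]
    · by_cases hk : k = "NONE"
      · simp [List.foldl_cons, pvAStep, hx, hk, ih, pvGo]
      · by_cases hkx : k = x
        · simp [List.foldl_cons, pvAStep, hx, hkx, ih, pvGo]
        · simp [List.foldl_cons, pvAStep, hx, hk, hkx, ih, pvGo, pvEmit]

theorem pvBRun_fold (ts : List String) : ∀ (k : String) (n : Int) (racc : List (String × Int)),
    (ts.foldl pvBRunStep ((k, n) :: racc)).reverse = racc.reverse ++ pvExt k n ts := by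
  induction ts with
  | nil => intro k n racc; simp [pvExt]
  | cons x rest ih =>
    intro k n racc
    by_cases h : k = x
    · simp [List.foldl_cons, pvBRunStep, h, ih, pvExt]
    · simp [List.foldl_cons, pvBRunStep, h, ih, pvExt]

theorem pvBEmit_fold (rs : List (String × Int)) : ∀ (parts : List String) (pos : Int),
    (rs.foldl pvBEmitStep (parts, pos)).1 = parts ++ pvParts pos rs := by
  induction rs with
  | nil => intro parts pos; simp [pvParts]
  | cons r rest ih =>
    intro parts pos
    obtain ⟨k, n⟩ := r
    by_cases h : k = "NONE"
    · simp [List.foldl_cons, pvBEmitStep, h, ih, pvParts]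
    · simp [List.foldl_cons, pvBEmitStep, h, ih, pvParts, pvEmit]

theorem pvExt_ne_nil (ts : List String) : ∀ (k : String) (n : Int), pvExt k n ts ≠ [] := by
  induction ts with
  | nil => intro k n; simp [pvExt]
  | cons x rest ih =>
    intro k n
    by_cases h : k = x <;> simp [pvExt, h, ih]

theorem pvExt_lastKey (ts : List String) : ∀ (k : String) (n : Int),
    ((pvExt k n ts).getLast (pvExt_ne_nil ts k n)).1 = ts.getLastD k := by
  induction ts with
  | nil => intro k n; simp [pvExt]
  | cons x rest ih =>
    intro k n
    by_cases h : k = x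
    · simp only [pvExt, if_pos h, List.getLastD_cons]
      rw [ih k (n + 1), h]
    · simp only [pvExt, if_neg h, List.getLastD_cons]
      rw [List.getLast_cons (pvExt_ne_nil rest x 1)]
      exact ih x 1

-- the main simulation: A's state machine emits exactly the non-final runs
theorem pvGo_eq_parts (ts : List String) : ∀ (k : String) (li n : Int),
    pvGo k li (li + n) ts = pvParts li ((pvExt k n ts).dropLast) := by
  induction ts with
  | nil => intro k li n; simp [pvGo, pvExt, pvParts]
  | cons x rest ih =>
    intro k li n
    by_cases hx : x = "NONE"
    · subst hx
      by_cases hk : k = "NONE"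
      · subst hk
        simp only [pvGo, pvExt, reduceIte]
        rw [show li + n + 1 = li + (n + 1) from by ring]
        exact ih "NONE" li (n + 1)
      · simp only [pvGo, pvExt, reduceIte, if_neg hk,
          List.dropLast_cons_of_ne_nil (pvExt_ne_nil rest "NONE" 1), pvParts]
        rw [ih "NONE" (li + n) 1]
        simp [pvEmit]
    · by_cases hk : k = "NONE"
      · subst hk
        have hxn : ¬ ("NONE" : String) = x := fun h => hx h.symm
        simp only [pvGo, pvExt, reduceIte, if_neg hx, if_neg hxn,
          List.dropLast_cons_of_ne_nil (pvExt_ne_nil rest x 1), pvParts]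
        rw [ih x (li + n) 1]
        simp
      · by_cases hkx : k = x
        · subst hkx
          simp only [pvGo, pvExt, reduceIte, if_neg hx]
          rw [show li + n + 1 = li + (n + 1) from by ring]
          exact ih k li (n + 1)
        · simp only [pvGo, pvExt, if_neg hx, if_neg hk, if_neg hkx,
            List.dropLast_cons_of_ne_nil (pvExt_ne_nil rest x 1), pvParts]
          rw [ih x (li + n) 1]
          simp [pvEmit]

-- dropping a trailing NONE run does not change the emitted parts
theorem pvParts_dropLast_none (rs : List (String × Int)) : ∀ (pos : Int) (h : rs ≠ []),
    (rs.getLast h).1 = "NONE" → pvParts pos rs.dropLast = pvParts pos rs := by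
  induction rs with
  | nil => intro pos h; exact absurd rfl h
  | cons r rest ih =>
    intro pos h hl
    cases rest with
    | nil =>
      obtain ⟨k, n⟩ := r
      simp at hl
      simp [pvParts, hl]
    | cons r2 rest2 =>
      obtain ⟨k, n⟩ := r
      rw [List.getLast_cons (by simp)] at hl
      simp only [List.dropLast_cons_of_ne_nil (by simp : (r2 :: rest2) ≠ []), pvParts]
      rw [ih (pos + n) (by simp) hl]
      simp [pvParts]

-- shifting length between position and pending length of a NONE run changes nothing
theorem pvParts_none_shift (ts : List String) : ∀ (li li' n n' : Int), li + n = li' + n' →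
    pvParts li ((pvExt "NONE" n ts).dropLast) = pvParts li' ((pvExt "NONE" n' ts).dropLast) := by
  induction ts with
  | nil => intro li li' n n' _; simp [pvExt, pvParts]
  | cons x rest ih =>
    intro li li' n n' he
    by_cases hx : "NONE" = x
    · simp only [pvExt, if_pos hx]
      exact ih li li' (n + 1) (n' + 1) (by omega)
    · simp only [pvExt, if_neg hx,
        List.dropLast_cons_of_ne_nil (pvExt_ne_nil rest x 1), pvParts]
      rw [he]
      simp

theorem pv_main (ts : List String) (hne : ts ≠ []) (hlast : ts.getLast hne = "NONE") :
    pvGo "NONE" (-1) 0 ts = pvParts 0 ((ts.foldl pvBRunStep []).reverse) := by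
  obtain ⟨x, rest, rfl⟩ := List.exists_cons_of_ne_nil hne
  have hB : ((x :: rest).foldl pvBRunStep []).reverse = pvExt x 1 rest := by
    simpa [List.foldl_cons, pvBRunStep] using pvBRun_fold rest x 1 []
  rw [hB]
  have hA : pvGo "NONE" (-1) 0 (x :: rest) = pvParts (-1) ((pvExt "NONE" 1 (x :: rest)).dropLast) := by
    simpa using pvGo_eq_parts (x :: rest) "NONE" (-1) 1
  rw [hA]
  by_cases hx : ("NONE" : String) = x
  · subst hx
    simp only [pvExt, reduceIte]
    rw [pvParts_none_shift rest (-1) 0 (1 + 1) 1 (by ring)]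
    cases rest with
    | nil => simp [pvExt, pvParts]
    | cons y t =>
      rw [List.getLast_cons (by simp)] at hlast
      refine pvParts_dropLast_none (pvExt "NONE" 1 (y :: t)) 0 (pvExt_ne_nil _ _ _) ?_
      rw [pvExt_lastKey]
      rw [List.getLastD_eq_getLast?, List.getLast?_eq_some_getLast (by simp), Option.getD_some, hlast]
  · have hne2 : rest ≠ [] := by
      intro h; subst h; simp at hlast; exact hx hlast.symm
    rw [List.getLast_cons hne2] at hlast
    simp only [pvExt, if_neg hx,
      List.dropLast_cons_of_ne_nil (pvExt_ne_nil rest x 1), pvParts, reduceIte, List.nil_append]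
    rw [pvParts_dropLast_none (pvExt x 1 rest) (-1 + 1) (pvExt_ne_nil _ _ _)
      (by rw [pvExt_lastKey, List.getLastD_eq_getLast?, List.getLast?_eq_some_getLast hne2, Option.getD_some, hlast])]
    norm_num

-- ===== VERDICT (by name: the statement is the Claim_ definition above) =====
theorem tags_to_text_spec : Claim_equal_tags_to_text := by
  intro tags _
  unfold Spec_tags_to_text
  rw [show tags_to_text tags
        = PySem.Str.join " " ((PySem.List.enumerate (tags ++ ["NONE"]) 0).foldl pvAStep ([], "NONE", -1)).1 from rfl,
      show tags_to_text_alt tags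
        = PySem.Str.join " " ((((tags ++ ["NONE"]).foldl pvBRunStep []).reverse).foldl pvBEmitStep ([], 0)).1 from rfl]
  have hne : tags ++ ["NONE"] ≠ [] := by simp
  have hlast : (tags ++ ["NONE"]).getLast hne = "NONE" := by simp
  rw [pvAStep_fold (tags ++ ["NONE"]) 0 [] "NONE" (-1),
      pvBEmit_fold (((tags ++ ["NONE"]).foldl pvBRunStep []).reverse) [] 0]
  simp only [List.nil_append]
  rw [pv_main (tags ++ ["NONE"]) hne hlast]
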